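-- pv_equiv track=rewrite | github.com/Tishuverma/AI-LabManual | Lab1.py | rabbit_get_successors
-- ===== SOURCE A (Python) =====
-- def rabbit_get_successors(state):
--     # state is list of chars: 'E', 'W', '_'
--     successors = []
--     length = len(state)
--     empty_index = state.index('_')
--
--     for i, rabbit in enumerate(state):
--         if rabbit == '_':
--             continue
--         # Rabbits move forward only
--         if rabbit == 'E':
--             # E moves right
--             step1 = i + 1
--             step2 = i + 2
--             if step1 == empty_index:
--                 new_state = state[:]
--                 new_state[i], new_state[empty_index] = new_state[empty_index], new_state[i]
--                 successors.append(new_state)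
--             elif step2 == empty_index and i + 1 < length and state[i+1] != '_':
--                 # Jump over one rabbit
--                 new_state = state[:]
--                 new_state[i], new_state[empty_index] = new_state[empty_index], new_state[i]
--                 successors.append(new_state)
--
--         else: # rabbit == 'W'
--             # W moves left
--             step1 = i - 1
--             step2 = i - 2
--             if step1 == empty_index:
--                 new_state = state[:]
--                 new_state[i], new_state[empty_index] = new_state[empty_index], new_state[i]
--                 successors.append(new_state)
--             elif step2 == empty_index and i - 1 >= 0 and state[i-1] != '_':
--                 # Jump over one rabbit
--                 new_state = state[:]
--                 new_state[i], new_state[empty_index] = new_state[empty_index], new_state[i]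
--                 successors.append(new_state)
--     return successors
-- ===== SOURCE B (Python) =====
-- def rabbit_get_successors(state):
--     # Loop-free: only the four cells around the (first) blank can move, in
--     # ascending source-index order e-2, e-1, e+1, e+2.
--     n = len(state)
--     e = state.index('_')
--     def swapped(i):
--         s = state[:]
--         s[i], s[e] = s[e], s[i]
--         return s
--     out = []
--     if e >= 2 and state[e - 2] == 'E':
--         out.append(swapped(e - 2))
--     if e >= 1 and state[e - 1] == 'E':
--         out.append(swapped(e - 1))
--     if e + 1 < n and state[e + 1] != 'E' and state[e + 1] != '_':
--         out.append(swapped(e + 1))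
--     if e + 2 < n and state[e + 2] != 'E' and state[e + 2] != '_' and state[e + 1] != '_':
--         out.append(swapped(e + 2))
--     return out
-- ===== Notes on version B (the rewrite author's own statement) =====
-- stated objective: simpler
-- what changed: B replaces A's scan over every board cell with four direct checks of the only candidate source cells e-2, e-1, e+1, e+2 around the blank's index e, appending the same swapped copies in the same ascending order.
import Mathlib
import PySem

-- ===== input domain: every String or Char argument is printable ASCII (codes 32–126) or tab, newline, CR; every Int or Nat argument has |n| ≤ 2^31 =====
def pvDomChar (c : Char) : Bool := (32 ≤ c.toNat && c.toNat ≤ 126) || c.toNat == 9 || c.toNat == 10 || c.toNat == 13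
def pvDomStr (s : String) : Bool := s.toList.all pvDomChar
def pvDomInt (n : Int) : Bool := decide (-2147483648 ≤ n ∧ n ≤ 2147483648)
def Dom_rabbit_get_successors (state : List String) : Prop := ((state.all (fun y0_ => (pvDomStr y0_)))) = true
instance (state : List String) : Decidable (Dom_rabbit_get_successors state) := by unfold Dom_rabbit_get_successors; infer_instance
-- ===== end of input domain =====

-- B replaces A's scan of every cell by four direct checks around the blank (same successors, same order); equivalence of return values.

-- ===== PORT A =====
-- Python's 'new[i], new[e] = new[e], new[i]' on a fresh copy: exact for in-range Nat indices i ≠ e (hand port).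
def pvSwap (st : List String) (i e : Nat) : List String :=
  (st.set i (st.getD e "")).set e (st.getD i "")

def rabbit_get_successors (state : List String) : List (List String) :=
  match PySem.List.index? state "_" with
  | none => []   -- Python raises ValueError here; excluded by Pre_
  | some empty_index =>
    let length : Int := state.length
    (PySem.List.enumerate state).foldl (fun successors p =>
      let i := p.1
      let rabbit := p.2
      if rabbit = "_" then successors
      else if rabbit = "E" then
        (if i + 1 = (empty_index : Int) then successors ++ [pvSwap state i.toNat empty_index]
         else if i + 2 = (empty_index : Int) ∧ i + 1 < length ∧ PySem.List.pyGetD state (i + 1) "" ≠ "_" then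
           successors ++ [pvSwap state i.toNat empty_index]
         else successors)
      else
        (if i - 1 = (empty_index : Int) then successors ++ [pvSwap state i.toNat empty_index]
         else if i - 2 = (empty_index : Int) ∧ 0 ≤ i - 1 ∧ PySem.List.pyGetD state (i - 1) "" ≠ "_" then
           successors ++ [pvSwap state i.toNat empty_index]
         else successors)) []

-- ===== PORT B =====
def rabbit_get_successors_alt (state : List String) : List (List String) :=
  match PySem.List.index? state "_" with
  | none => []   -- Python raises ValueError here; excluded by Pre_
  | some e =>
    let n := state.length
    (if 2 ≤ e ∧ state.getD (e - 2) "" = "E" then [pvSwap state (e - 2) e] else []) ++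
    (if 1 ≤ e ∧ state.getD (e - 1) "" = "E" then [pvSwap state (e - 1) e] else []) ++
    (if e + 1 < n ∧ state.getD (e + 1) "" ≠ "E" ∧ state.getD (e + 1) "" ≠ "_" then [pvSwap state (e + 1) e] else []) ++
    (if e + 2 < n ∧ state.getD (e + 2) "" ≠ "E" ∧ state.getD (e + 2) "" ≠ "_" ∧ state.getD (e + 1) "" ≠ "_" then
       [pvSwap state (e + 2) e] else [])

-- ===== PRECONDITION & SPEC =====
-- Pre_ excludes exactly the inputs with no '_' cell, on which Python's state.index('_') raises ValueError.
def Pre_rabbit_get_successors (state : List String) : Prop := "_" ∈ state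
instance (state : List String) : Decidable (Pre_rabbit_get_successors state) := by
  unfold Pre_rabbit_get_successors; infer_instance
def pvWitness_rabbit_get_successors : List String := ["E", "E", "_", "W", "W"]

def Spec_rabbit_get_successors (state : List String) (out : List (List String)) : Prop := out = rabbit_get_successors_alt state
instance (state : List String) (out : List (List String)) : Decidable (Spec_rabbit_get_successors state out) := by unfold Spec_rabbit_get_successors; infer_instance

-- ===== CLAIM (what is proved, stated in full; the proofs are below) =====
def Claim_equal_rabbit_get_successors : Prop := ∀ (state : List String), Dom_rabbit_get_successors state → Pre_rabbit_get_successors state → Spec_rabbit_get_successors state (rabbit_get_successors state)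

-- ===== LEMMAS AND PROOFS =====

-- The per-cell contribution of A's loop body (used only by the proofs).
def pvContrib (state : List String) (len : Int) (e : Nat) (p : Int × String) : List (List String) :=
  if p.2 = "_" then []
  else if p.2 = "E" then
    (if p.1 + 1 = (e : Int) then [pvSwap state p.1.toNat e]
     else if p.1 + 2 = (e : Int) ∧ p.1 + 1 < len ∧ PySem.List.pyGetD state (p.1 + 1) "" ≠ "_" then
       [pvSwap state p.1.toNat e]
     else [])
  else
    (if p.1 - 1 = (e : Int) then [pvSwap state p.1.toNat e]
     else if p.1 - 2 = (e : Int) ∧ 0 ≤ p.1 - 1 ∧ PySem.List.pyGetD state (p.1 - 1) "" ≠ "_" then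
       [pvSwap state p.1.toNat e]
     else [])

lemma pvContrib_big (state : List String) (len : Int) (e : Nat) :
    ∀ (l : List String) (k : Nat), e + 2 < k →
      (PySem.List.enumerate l (k : Int)).flatMap (pvContrib state len e) = [] := by
  intro l
  induction l with
  | nil => intro k _; simp [PySem.List.enumerate_nil]
  | cons x rest ih =>
    intro k hk
    rw [PySem.List.enumerate_cons]
    have hcast : ((k : Int) + 1) = ((k + 1 : Nat) : Int) := by push_cast; ring
    rw [List.flatMap_cons, hcast, ih (k + 1) (by omega)]
    have hc : pvContrib state len e ((k : Int), x) = [] := by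
      simp only [pvContrib]
      split_ifs with h1 h2 h3 h4 h5 h6 <;> first | rfl | (exfalso; omega)
    simp [hc]

-- Evaluations of A's loop body at the only indices that can contribute.
lemma pvContrib_eq_one (state : List String) (len : Int) (e k : Nat) (x : String)
    (hk : k + 1 = e) :
    pvContrib state len e ((k : Int), x) = if x = "E" then [pvSwap state k e] else [] := by
  by_cases h0 : x = "_"
  · simp [pvContrib, h0]
  by_cases hE : x = "E"
  · simp [pvContrib, hE, show ((k : Int) + 1 = (e : Int)) by omega,
      show ((k : Int)).toNat = k by omega]
  · simp [pvContrib, h0, hE, show ¬((k : Int) - 1 = (e : Int)) by omega,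
      show ¬((k : Int) - 2 = (e : Int)) by omega]

lemma pvContrib_eq_two (state : List String) (len : Int) (e k : Nat) (x : String)
    (hk : k + 2 = e) (hl : (k : Int) + 1 < len)
    (hg : state.getD (k + 1) "" ≠ "_") :
    pvContrib state len e ((k : Int), x) = if x = "E" then [pvSwap state k e] else [] := by
  have hcast : ((k : Int) + 1) = ((k + 1 : Nat) : Int) := by push_cast; ring
  have hgg : PySem.List.pyGetD state ((k : Int) + 1) "" = state.getD (k + 1) "" := by
    rw [hcast, PySem.List.pyGetD_natCast]
  have hg' : ¬ state[k + 1]?.getD "" = "_" := by simpa [List.getD_eq_getElem?_getD] using hg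
  by_cases h0 : x = "_"
  · simp [pvContrib, h0]
  by_cases hE : x = "E"
  · simp [pvContrib, hE, hgg, hg', hl,
      show ¬((k : Int) + 1 = (e : Int)) by omega,
      show ((k : Int) + 2 = (e : Int)) by omega,
      show ((k : Int)).toNat = k by omega]
  · simp [pvContrib, h0, hE, show ¬((k : Int) - 1 = (e : Int)) by omega,
      show ¬((k : Int) - 2 = (e : Int)) by omega]

lemma pvContrib_small (state : List String) (len : Int) (e k : Nat) (x : String)
    (hk : k + 2 < e) :
    pvContrib state len e ((k : Int), x) = [] := by
  simp only [pvContrib]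
  split_ifs with h1 h2 h3 h4 h5 h6 <;> first | rfl | (exfalso; omega)

lemma pvContrib_eplus1 (state : List String) (len : Int) (e : Nat) (x : String) :
    pvContrib state len e ((e : Int) + 1, x) =
      if x ≠ "E" ∧ x ≠ "_" then [pvSwap state (e + 1) e] else [] := by
  by_cases h0 : x = "_"
  · simp [pvContrib, h0]
  by_cases hE : x = "E"
  · simp [pvContrib, hE, show ¬((e : Int) + 1 + 1 = (e : Int)) by omega,
      show ¬((e : Int) + 1 + 2 = (e : Int)) by omega]
  · simp [pvContrib, h0, hE, show ((e : Int) + 1 - 1 = (e : Int)) by ring,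
      show ((e : Int) + 1).toNat = e + 1 by omega]

lemma pvContrib_eplus2 (state : List String) (len : Int) (e : Nat) (x : String) :
    pvContrib state len e ((e : Int) + 2, x) =
      if x ≠ "E" ∧ x ≠ "_" ∧ state.getD (e + 1) "" ≠ "_" then [pvSwap state (e + 2) e] else [] := by
  have hgg : PySem.List.pyGetD state ((e : Int) + 2 - 1) "" = state.getD (e + 1) "" := by
    rw [show ((e : Int) + 2 - 1) = ((e + 1 : Nat) : Int) by push_cast; ring,
      PySem.List.pyGetD_natCast]
  by_cases h0 : x = "_"
  · simp [pvContrib, h0]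
  by_cases hE : x = "E"
  · simp [pvContrib, hE, show ¬((e : Int) + 2 + 1 = (e : Int)) by omega,
      show ¬((e : Int) + 2 + 2 = (e : Int)) by omega]
  · by_cases hg : state.getD (e + 1) "" = "_" <;>
      [(have hg' : state[e + 1]?.getD "" = "_" := by
          simpa [List.getD_eq_getElem?_getD] using hg);
       (have hg' : ¬ state[e + 1]?.getD "" = "_" := by
          simpa [List.getD_eq_getElem?_getD] using hg)] <;>
    simp [pvContrib, h0, hE, hg', hgg,
      show ¬((e : Int) + 2 - 1 = (e : Int)) by omega,
      show ((e : Int) + 2 - 2 = (e : Int)) by ring,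
      show ((1 : Int) ≤ (e : Int) + 2) by omega,
      show ((e : Int) + 2).toNat = e + 2 by omega]

lemma pvPre_side (state : List String) (len : Int) (e : Nat)
    (hlen : len = (state.length : Int)) (he : e < state.length)
    (hfirst : ∀ j, j < e → state.getD j "" ≠ "_") :
    ∀ (l : List String) (k : Nat), k + l.length = e →
      (∀ j (hj : j < l.length), l[j] = state.getD (k + j) "") →
      (PySem.List.enumerate l (k : Int)).flatMap (pvContrib state len e) =
        (if k + 2 ≤ e ∧ state.getD (e - 2) "" = "E" then [pvSwap state (e - 2) e] else []) ++
        (if k + 1 ≤ e ∧ state.getD (e - 1) "" = "E" then [pvSwap state (e - 1) e] else []) := by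
  intro l
  induction l with
  | nil =>
    intro k hk _
    simp only [List.length_nil, Nat.add_zero] at hk
    have h1 : ¬ (k + 2 ≤ e) := by omega
    have h2 : ¬ (k + 1 ≤ e) := by omega
    simp [PySem.List.enumerate_nil, h1, h2]
  | cons x rest ih =>
    intro k hk hlink
    simp only [List.length_cons] at hk
    have hklt : k < e := by omega
    have hx : state.getD k "" = x := by
      have h0 := hlink 0 (by simp)
      simpa using h0.symm
    have hxk : state[k]?.getD "" = x := by
      simpa [List.getD_eq_getElem?_getD] using hx
    have hxne : x ≠ "_" := by rw [← hx]; exact hfirst k hklt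
    rw [PySem.List.enumerate_cons]
    have hcast : ((k : Int) + 1) = ((k + 1 : Nat) : Int) := by push_cast; ring
    have hlink' : ∀ j (hj : j < rest.length), rest[j] = state.getD (k + 1 + j) "" := by
      intro j hj
      have := hlink (j + 1) (by simpa using Nat.succ_lt_succ hj)
      rw [show k + 1 + j = k + (j + 1) by omega]
      simpa using this
    rw [List.flatMap_cons, hcast, ih (k + 1) (by omega) hlink']
    rcases Nat.lt_or_ge (k + 2) e with hcase | hge
    · -- k + 2 < e : head contributes nothing, conditions unchanged
      rw [pvContrib_small state len e k x hcase]
      have e1 : (k + 1 + 2 ≤ e) ↔ (k + 2 ≤ e) := by omega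
      have e2 : (k + 1 + 1 ≤ e) ↔ (k + 1 ≤ e) := by omega
      simp only [e1, e2, List.nil_append]
    · rcases Nat.lt_or_ge (k + 1) e with hcase2 | hge2
      · -- k + 2 = e : head is the E-jump candidate
        have hke : k + 2 = e := by omega
        have hl : (k : Int) + 1 < len := by rw [hlen]; omega
        have hg : state.getD (k + 1) "" ≠ "_" := hfirst (k + 1) (by omega)
        rw [pvContrib_eq_two state len e k x hke hl hg]
        have f1 : ¬ (k + 1 + 2 ≤ e) := by omega
        have f1' : ¬ (k + 2 < e) := by omega
        have t1 : k + 2 ≤ e := by omega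
        have t2 : k + 1 + 1 ≤ e := by omega
        have t3 : k + 1 ≤ e := by omega
        have t3' : k < e := by omega
        have t2' : k + 1 ≤ e := by omega
        have hik : e - 2 = k := by omega
        by_cases hxe : x = "E" <;>
          simp [hxe, f1, t1, t3, hik, hxk]
      · -- k + 1 = e : head is the E-step candidate
        have hke : k + 1 = e := by omega
        rw [pvContrib_eq_one state len e k x hke]
        have f1 : ¬ (k + 1 + 2 ≤ e) := by omega
        have f1' : ¬ (k + 2 < e) := by omega
        have f2 : ¬ (k + 1 + 1 ≤ e) := by omega
        have f2' : ¬ (k + 1 < e) := by omega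
        have f3 : ¬ (k + 2 ≤ e) := by omega
        have t4 : k + 1 ≤ e := by omega
        have t4' : k < e := by omega
        have hik : e - 1 = k := by omega
        by_cases hxe : x = "E" <;>
          simp [hxe, f1, f2, t4, hik, hxk]

lemma pvSuf_side (state : List String) (len : Int) (e : Nat) :
    ∀ (suf : List String), state.length = e + 1 + suf.length →
      (∀ j (hj : j < suf.length), suf[j] = state.getD (e + 1 + j) "") →
      (PySem.List.enumerate suf ((e : Int) + 1)).flatMap (pvContrib state len e) =
        (if e + 1 < state.length ∧ state.getD (e + 1) "" ≠ "E" ∧ state.getD (e + 1) "" ≠ "_" then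
           [pvSwap state (e + 1) e] else []) ++
        (if e + 2 < state.length ∧ state.getD (e + 2) "" ≠ "E" ∧ state.getD (e + 2) "" ≠ "_" ∧
            state.getD (e + 1) "" ≠ "_" then [pvSwap state (e + 2) e] else []) := by
  intro suf
  match suf with
  | [] =>
    intro hL _
    have h1 : ¬ (e + 1 < state.length) := by simp at hL; omega
    have h2 : ¬ (e + 2 < state.length) := by simp at hL; omega
    simp [PySem.List.enumerate_nil, h1, h2]
  | [a] =>
    intro hL hlink
    have ha : state.getD (e + 1) "" = a := by simpa using (hlink 0 (by simp)).symm
    have h2 : ¬ (e + 2 < state.length) := by simp at hL; omega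
    have h1 : e + 1 < state.length := by simp at hL; omega
    rw [PySem.List.enumerate_cons, List.flatMap_cons, PySem.List.enumerate_nil]
    rw [pvContrib_eplus1 state len e a]
    simp only [h2, false_and, if_false, List.flatMap_nil, List.append_nil, h1, true_and, ha]
  | a :: b :: rest =>
    intro hL hlink
    have ha : state.getD (e + 1) "" = a := by simpa using (hlink 0 (by simp)).symm
    have hb : state.getD (e + 2) "" = b := by
      have := hlink 1 (by simp)
      simpa [show e + 1 + 1 = e + 2 by omega] using this.symm
    have h1 : e + 1 < state.length := by simp at hL; omega
    have h2 : e + 2 < state.length := by simp at hL; omega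
    rw [PySem.List.enumerate_cons, List.flatMap_cons, PySem.List.enumerate_cons, List.flatMap_cons]
    have hcast : ((e : Int) + 1 + 1) = ((e : Int) + 2) := by ring
    have hcast2 : ((e : Int) + 2 + 1) = (((e + 3 : Nat)) : Int) := by push_cast; ring
    rw [hcast, hcast2, pvContrib_big state len e rest (e + 3) (by omega)]
    rw [pvContrib_eplus1 state len e a, pvContrib_eplus2 state len e b]
    simp only [h1, h2, true_and, ha, hb, List.append_nil]

-- ===== VERDICT (by name: the statement is the Claim_ definition above) =====
theorem rabbit_get_successors_spec : Claim_equal_rabbit_get_successors := by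
  unfold Claim_equal_rabbit_get_successors
  intro state _ hpre
  unfold Spec_rabbit_get_successors
  obtain ⟨e, he⟩ := Option.isSome_iff_exists.mp ((PySem.List.index?_isSome_iff state "_").mpr hpre)
  obtain ⟨pre, suf, hst, hplen, hnot⟩ := (PySem.List.index?_eq_some_iff _ _ _).mp he
  have hL : state.length = e + 1 + suf.length := by
    rw [hst]; simp [hplen]; omega
  have hgetD_pre : ∀ j, j < e → state.getD j "" = pre.getD j "" := by
    intro j hj
    rw [hst, List.getD_eq_getElem?_getD, List.getD_eq_getElem?_getD,
      List.getElem?_append_left (by omega : j < pre.length)]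
  have hfirst : ∀ j, j < e → state.getD j "" ≠ "_" := by
    intro j hj hcontra
    rw [hgetD_pre j hj] at hcontra
    have hjlt : j < pre.length := by omega
    rw [List.getD_eq_getElem?_getD, List.getElem?_eq_getElem hjlt] at hcontra
    exact hnot (hcontra ▸ List.getElem_mem hjlt)
  have hlinkpre : ∀ j (hj : j < pre.length), pre[j] = state.getD j "" := by
    intro j hj
    rw [hgetD_pre j (by omega), List.getD_eq_getElem?_getD, List.getElem?_eq_getElem hj]
    rfl
  have hlinksuf : ∀ j (hj : j < suf.length), suf[j] = state.getD (e + 1 + j) "" := by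
    intro j hj
    rw [hst, List.getD_eq_getElem?_getD,
      List.getElem?_append_right (by omega : pre.length ≤ e + 1 + j)]
    rw [hplen, show e + 1 + j - e = j + 1 by omega, List.getElem?_cons_succ,
      List.getElem?_eq_getElem hj]
    rfl
  have hsplit : PySem.List.enumerate state =
      PySem.List.enumerate pre ((0 : Nat) : Int) ++
        ((e : Int), "_") :: PySem.List.enumerate suf ((e : Int) + 1) := by
    conv_lhs => rw [hst]
    rw [show ((0 : Nat) : Int) = 0 by simp]
    rw [PySem.List.enumerate_append, PySem.List.enumerate_cons, hplen]
    norm_num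
  simp only [rabbit_get_successors, rabbit_get_successors_alt, he]
  have hfold :
      List.foldl
        (fun (successors : List (List String)) (p : Int × String) =>
          if p.2 = "_" then successors
          else
            if p.2 = "E" then
              if p.1 + 1 = (e : Int) then successors ++ [pvSwap state p.1.toNat e]
              else
                if p.1 + 2 = (e : Int) ∧ p.1 + 1 < ((state.length : Nat) : Int) ∧
                    PySem.List.pyGetD state (p.1 + 1) "" ≠ "_" then
                  successors ++ [pvSwap state p.1.toNat e]
                else successors
            else
              if p.1 - 1 = (e : Int) then successors ++ [pvSwap state p.1.toNat e]
              else
                if p.1 - 2 = (e : Int) ∧ 0 ≤ p.1 - 1 ∧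
                    PySem.List.pyGetD state (p.1 - 1) "" ≠ "_" then
                  successors ++ [pvSwap state p.1.toNat e]
                else successors)
        [] (PySem.List.enumerate state) =
      List.foldl
        (fun acc p => acc ++ pvContrib state ((state.length : Nat) : Int) e p)
        [] (PySem.List.enumerate state) :=
    PySem.List.foldl_congr_mem _ _ _ _ (by
      intro acc p _
      simp only [pvContrib]
      split_ifs <;> simp)
  rw [hfold, PySem.List.foldl_append_eq_flatMap]
  rw [hsplit, List.flatMap_append, List.flatMap_cons]
  have hmid : pvContrib state ((state.length : Nat) : Int) e ((e : Int), "_") = [] := by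
    simp [pvContrib]
  rw [hmid]
  rw [pvPre_side state ((state.length : Nat) : Int) e rfl (by omega) hfirst pre 0
    (by omega) (by intro j hj; simpa using hlinkpre j hj)]
  rw [pvSuf_side state ((state.length : Nat) : Int) e suf hL hlinksuf]
  simp [List.append_assoc]
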